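-- pv_equiv track=rewrite | github.com/yasha-dev1/flowhunt-toolkit | flowhunt_toolkit/utils/markdown_processor.py | _extract_h2_headers
-- ===== SOURCE A (Python) =====
-- from typing import List, Tuple, Optional
--
-- def _extract_h2_headers(text: str) -> List[str]:
--     """Extract H2 headers from text.
--
--     Args:
--         text: Text to extract headers from
--
--     Returns:
--         List of H2 header strings (without the ## prefix)
--     """
--     headers = []
--     for line in text.split('\n'):
--         stripped = line.strip()
--         # Match ## but not ###
--         if stripped.startswith('## ') and not stripped.startswith('### '):
--             # Remove the ## prefix and clean up
--             header_text = stripped[3:].strip()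
--             if header_text:
--                 headers.append(header_text)
--     return headers
-- ===== SOURCE B (Python) =====
-- from typing import List
--
-- def _extract_h2_headers(text: str) -> List[str]:
--     """Extract H2 headers in a single character pass (state machine), no split/strip calls."""
--     headers: List[str] = []
--     state = 0        # 0: at line start skipping whitespace, 1: seen '#', 2: seen '##',
--                      # 3: collecting header text, 4: dead line
--     buf: List[str] = []   # committed header chars (never ends in whitespace)
--     pend: List[str] = []  # trailing whitespace not yet committed
--     for ch in text + '\n':
--         if ch == '\n':
--             if state == 3 and buf:
--                 headers.append(''.join(buf))
--             state, buf, pend = 0, [], []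
--         elif state == 0:
--             if ch == '#':
--                 state = 1
--             elif not ch.isspace():
--                 state = 4
--         elif state == 1:
--             state = 2 if ch == '#' else 4
--         elif state == 2:
--             state = 3 if ch == ' ' else 4
--         elif state == 3:
--             if ch.isspace():
--                 if buf:
--                     pend.append(ch)
--             else:
--                 buf.extend(pend)
--                 buf.append(ch)
--                 pend = []
--     return headers
-- ===== Notes on version B (the rewrite author's own statement) =====
-- stated objective: alternative
-- what changed: A splits the text into lines and uses strip/startswith/slice/strip per line; B makes a single character-by-character pass with a 5-state machine (skip indent, match '#','#',' ', collect header chars with a pending-whitespace buffer), building each header without any split or strip calls.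
import Mathlib
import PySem

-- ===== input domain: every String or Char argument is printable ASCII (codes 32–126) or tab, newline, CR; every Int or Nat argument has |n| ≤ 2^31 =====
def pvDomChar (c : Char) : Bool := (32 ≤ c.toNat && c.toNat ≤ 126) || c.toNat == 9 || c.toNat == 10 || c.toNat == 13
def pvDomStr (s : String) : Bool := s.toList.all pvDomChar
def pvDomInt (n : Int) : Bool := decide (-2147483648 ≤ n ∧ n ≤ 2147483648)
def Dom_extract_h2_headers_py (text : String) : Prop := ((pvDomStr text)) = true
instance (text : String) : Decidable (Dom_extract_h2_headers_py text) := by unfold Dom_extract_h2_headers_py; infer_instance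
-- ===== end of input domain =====

-- B replaces A's split/strip/startswith line processing by a single character pass
-- (a 5-state machine over the text); objective: alternative (same O(n) cost, one pass, no
-- intermediate line/stripped strings).

-- ===== PORT A =====
-- split('\n') has a non-empty separator, so Str.split? is always `some`; `.getD []` is never the fallback
def extract_h2_headers_py (text : String) : List String :=
  ((PySem.Str.split? text "\n").getD []).foldl
    (fun headers line =>
      let stripped := PySem.Str.strip line
      -- Match ## but not ###
      if PySem.Str.startswith stripped "## " && ! PySem.Str.startswith stripped "### " then
        -- Remove the ## prefix and clean up
        let header_text := PySem.Str.strip (PySem.Str.slice stripped (some 3) none)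
        if header_text ≠ "" then headers ++ [header_text] else headers
      else headers)
    []

-- ===== PORT B =====
-- state 0: at line start skipping whitespace, 1: seen '#', 2: seen '##',
-- 3: collecting header text (buf = committed chars, pend = pending trailing whitespace), 4: dead line
def pvStep (acc : List String × Nat × List Char × List Char) (ch : Char) :
    List String × Nat × List Char × List Char :=
  let (headers, state, buf, pend) := acc
  if ch = '\n' then
    (if state = 3 ∧ buf ≠ [] then headers ++ [String.ofList buf] else headers, 0, [], [])
  else if state = 0 then
    if ch = '#' then (headers, 1, buf, pend)
    else if ¬ (PySem.Chars.isspace ch = true) then (headers, 4, buf, pend)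
    else (headers, state, buf, pend)
  else if state = 1 then (headers, if ch = '#' then 2 else 4, buf, pend)
  else if state = 2 then (headers, if ch = ' ' then 3 else 4, buf, pend)
  else if state = 3 then
    if PySem.Chars.isspace ch then
      if buf ≠ [] then (headers, state, buf, pend ++ [ch]) else (headers, state, buf, pend)
    else (headers, state, buf ++ pend ++ [ch], [])
  else (headers, state, buf, pend)

def extract_h2_headers_py_alt (text : String) : List String :=
  ((text.toList ++ ['\n']).foldl pvStep ([], 0, [], [])).1

-- ===== PRECONDITION & SPEC =====
def Spec_extract_h2_headers_py (text : String) (out : List String) : Prop := out = extract_h2_headers_py_alt text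
instance (text : String) (out : List String) : Decidable (Spec_extract_h2_headers_py text out) := by unfold Spec_extract_h2_headers_py; infer_instance

-- ===== CLAIM (what is proved, stated in full; the proofs are below) =====
def Claim_equal_extract_h2_headers_py : Prop := ∀ (text : String), Dom_extract_h2_headers_py text → Spec_extract_h2_headers_py text (extract_h2_headers_py text)

-- ===== LEMMAS AND PROOFS =====

-- A's per-line body, on the character level
def aLineChars (hs : List String) (l : List Char) : List String :=
  let s := PySem.Chars.strip l
  if PySem.Chars.startswith s ['#', '#', ' '] && ! PySem.Chars.startswith s ['#', '#', '#', ' '] then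
    let h := PySem.Chars.strip (s.drop 3)
    if h ≠ [] then hs ++ [String.ofList h] else hs
  else hs

-- structural version of splitOn on '\n'
def pvLines : List Char → List (List Char)
  | [] => [[]]
  | c :: t => if c = '\n' then [] :: pvLines t else (pvLines t).modifyHead (c :: ·)

theorem pvLines_ne_nil (cs : List Char) : pvLines cs ≠ [] := by
  induction cs with
  | nil => simp [pvLines]
  | cons c t ih =>
    simp only [pvLines]
    split
    · simp
    · cases h : pvLines t with
      | nil => exact absurd h ih
      | cons a r => simp [List.modifyHead]

theorem splitOn_go_eq (cs : List Char) : ∀ (fuel : Nat) (cur : List Char) (acc : List (List Char)),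
    cs.length < fuel →
    PySem.Chars.splitOn.go ['\n'] fuel cs cur acc
      = acc.reverse ++ (pvLines cs).modifyHead (cur.reverse ++ ·) := by
  induction cs with
  | nil =>
    intro fuel cur acc _
    rw [PySem.Chars.splitOn.go.eq_def]
    cases fuel <;> simp [pvLines, List.modifyHead]
  | cons c t ih =>
    intro fuel cur acc h
    cases fuel with
    | zero => simp at h
    | succ f =>
      rw [PySem.Chars.splitOn.go.eq_def]
      by_cases hc : c = '\n'
      · subst hc
        have hp : ['\n'].isPrefixOf ('\n' :: t) = true := by simp [List.isPrefixOf]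
        simp only [hp, if_true, List.length_singleton, List.drop_succ_cons, List.drop_zero]
        rw [ih f [] (cur.reverse :: acc) (by simpa using Nat.lt_of_succ_lt_succ h)]
        simp only [pvLines, if_true, List.modifyHead, List.reverse_cons, List.append_assoc,
          List.singleton_append]
        cases pvLines t <;> simp
      · have hp : ['\n'].isPrefixOf (c :: t) = false := by
          simp [List.isPrefixOf]
          exact fun hh => hc hh.symm
        simp only [hp, if_false, Bool.false_eq_true]
        rw [ih f (c :: cur) acc (by simpa using Nat.lt_of_succ_lt_succ h)]
        obtain ⟨a, r, hr⟩ : ∃ a r, pvLines t = a :: r := by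
          cases hl : pvLines t with
          | nil => exact absurd hl (pvLines_ne_nil t)
          | cons a r => exact ⟨a, r, rfl⟩
        simp [pvLines, hc, hr, List.modifyHead]

theorem splitOn_eq (cs : List Char) : PySem.Chars.splitOn cs ['\n'] = pvLines cs := by
  rw [PySem.Chars.splitOn, splitOn_go_eq cs (cs.length + 1) [] [] (Nat.lt_succ_self _)]
  obtain ⟨a, r, hr⟩ : ∃ a r, pvLines cs = a :: r := by
    cases hl : pvLines cs with
    | nil => exact absurd hl (pvLines_ne_nil cs)
    | cons a r => exact ⟨a, r, rfl⟩
  simp [hr, List.modifyHead]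

theorem pvLines_of_no_nl (cs : List Char) (h : '\n' ∉ cs) : pvLines cs = [cs] := by
  induction cs with
  | nil => rfl
  | cons c t ih =>
    have hc : c ≠ '\n' := fun hh => h (by simp [hh])
    have ht := ih (fun hm => h (List.mem_cons_of_mem _ hm))
    simp [pvLines, hc, ht, List.modifyHead]

theorem pvLines_append (l t : List Char) (h : '\n' ∉ l) :
    pvLines (l ++ '\n' :: t) = l :: pvLines t := by
  induction l with
  | nil => simp [pvLines]
  | cons c r ih =>
    have hc : c ≠ '\n' := fun hh => h (by simp [hh])
    have hr := ih (fun hm => h (List.mem_cons_of_mem _ hm))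
    simp [pvLines, hc, hr, List.modifyHead]

-- A's per-line body applied to `String.ofList l` is `aLineChars … l`
theorem aLine_str (hs : List String) (l : List Char) :
    (let stripped := PySem.Str.strip (String.ofList l)
     if PySem.Str.startswith stripped "## " && ! PySem.Str.startswith stripped "### " then
       let header_text := PySem.Str.strip (PySem.Str.slice stripped (some 3) none)
       if header_text ≠ "" then hs ++ [header_text] else hs
     else hs) = aLineChars hs l := by
  have hp1 : ("## " : String).toList = ['#', '#', ' '] := by decide
  have hp2 : ("### " : String).toList = ['#', '#', '#', ' '] := by decide
  have hslice : PySem.Str.slice (String.ofList (PySem.Chars.strip l)) (some 3) none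
      = String.ofList ((PySem.Chars.strip l).drop 3) := by
    simp [PySem.Str.slice, PySem.List.slice_from _ (by norm_num : (0:Int) ≤ 3)]
  have hemp : ∀ h : List Char, (String.ofList h ≠ "") = (h ≠ []) := by
    intro h
    simp only [ne_eq, eq_iff_iff]
    constructor
    · intro hh he; exact hh (by simp [he])
    · intro hh he; apply hh; have := congrArg String.toList he; simpa using this
  simp only [PySem.Str.startswith_eq, String.toList_ofList, hp1, hp2, hslice,
    PySem.Str.strip, aLineChars, hemp]

-- A at the character level
theorem A_eq (text : String) :
    extract_h2_headers_py text = (pvLines text.toList).foldl aLineChars [] := by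
  have hsep : ("\n" : String).toList = ['\n'] := by decide
  have hsplit : PySem.Str.split? text "\n"
      = some ((pvLines text.toList).map String.ofList) := by
    simp [PySem.Str.split?, PySem.Chars.split?, hsep, splitOn_eq]
  rw [extract_h2_headers_py, hsplit]
  simp only [Option.getD_some, List.foldl_map]
  exact PySem.List.foldl_congr_mem _ _ _ _ (fun acc x _ => aLine_str acc x)

-- ---- whitespace / strip toolbox ----
theorem rstrip_all_ws (l : List Char) (h : l.all PySem.Chars.isspace) :
    PySem.Chars.rstrip l = [] := by
  simp only [PySem.Chars.rstrip]
  rw [List.dropWhile_eq_nil_iff.mpr (fun x hx => by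
    simp at h
    exact h x (List.mem_reverse.mp hx))]
  rfl

theorem rstrip_append_all_ws (x t : List Char) (h : t.all PySem.Chars.isspace) :
    PySem.Chars.rstrip (x ++ t) = PySem.Chars.rstrip x := by
  simp only [PySem.Chars.rstrip, List.reverse_append, List.dropWhile_append]
  rw [List.dropWhile_eq_nil_iff.mpr (fun y hy => by
    simp at h
    exact h y (List.mem_reverse.mp hy))]
  simp

theorem rstrip_append_cons (x t : List Char) (c : Char) (hc : PySem.Chars.isspace c = false) :
    PySem.Chars.rstrip (x ++ c :: t) = x ++ c :: PySem.Chars.rstrip t := by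
  simp only [PySem.Chars.rstrip, List.reverse_append, List.reverse_cons, List.append_assoc,
    List.singleton_append, List.dropWhile_append]
  split
  · next hnil =>
    simp only [List.dropWhile_cons, hc, Bool.false_eq_true, if_false]
    rw [List.isEmpty_iff] at hnil
    rw [List.dropWhile_eq_nil_iff] at hnil
    rw [List.dropWhile_eq_nil_iff.mpr (fun y hy => hnil y hy)]
    simp
  · simp

theorem rstrip_idem (l : List Char) :
    PySem.Chars.rstrip (PySem.Chars.rstrip l) = PySem.Chars.rstrip l := by
  simp only [PySem.Chars.rstrip, List.reverse_reverse]
  cases hd : List.dropWhile PySem.Chars.isspace l.reverse with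
  | nil => rfl
  | cons a r =>
    have ha : PySem.Chars.isspace a = false := by
      have := List.head_dropWhile_not PySem.Chars.isspace (l := l.reverse) (by simp [hd])
      simpa [hd] using this
    simp [ha]

theorem rstrip_prefix (l : List Char) : PySem.Chars.rstrip l <+: l := by
  refine ⟨(List.takeWhile PySem.Chars.isspace l.reverse).reverse, ?_⟩
  simp only [PySem.Chars.rstrip]
  rw [← List.reverse_append, List.takeWhile_append_dropWhile, List.reverse_reverse]

theorem strip_nil_all (l : List Char) (h : PySem.Chars.strip l = []) :
    l.all PySem.Chars.isspace = true := by
  simp only [PySem.Chars.strip, PySem.Chars.lstrip] at h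
  have hd : List.dropWhile PySem.Chars.isspace l = [] := by
    cases hd : List.dropWhile PySem.Chars.isspace l with
    | nil => rfl
    | cons a r =>
      have ha : PySem.Chars.isspace a = false := by
        have := List.head_dropWhile_not PySem.Chars.isspace (l := l) (by simp [hd])
        simpa [hd] using this
      rw [hd] at h
      rw [show (a :: r) = [] ++ a :: r from rfl, rstrip_append_cons [] r a ha] at h
      simp at h
  have := List.dropWhile_eq_nil_iff.mp hd
  exact List.all_eq_true.mpr this

-- ---- the machine on one line ----
-- committed/pending buffers of B's collecting state, as a pure recursion
def fcollect (buf pend : List Char) : List Char → List Char × List Char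
  | [] => (buf, pend)
  | c :: t =>
    if PySem.Chars.isspace c then
      if buf ≠ [] then fcollect buf (pend ++ [c]) t else fcollect buf pend t
    else fcollect (buf ++ pend ++ [c]) [] t

theorem collect_fold (l : List Char) (h : '\n' ∉ l) (hs : List String) (buf pend : List Char) :
    l.foldl pvStep (hs, 3, buf, pend) = (hs, 3, fcollect buf pend l) := by
  induction l generalizing buf pend with
  | nil => rfl
  | cons c t ih =>
    have hc : c ≠ '\n' := fun hh => h (by simp [hh])
    have ht : '\n' ∉ t := fun hm => h (List.mem_cons_of_mem _ hm)
    simp only [List.foldl_cons, pvStep, hc, if_false, fcollect]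
    by_cases hsp : PySem.Chars.isspace c = true
    · by_cases hb : buf = []
      · simp [hsp, hb, ih ht _ _]
      · simp [hsp, hb, ih ht _ _]
    · simp [hsp, ih ht _ _]

theorem fcollect_ne (l : List Char) : ∀ (buf pend : List Char), buf ≠ [] →
    pend.all PySem.Chars.isspace → (fcollect buf pend l).1 = buf ++ PySem.Chars.rstrip (pend ++ l) := by
  induction l with
  | nil =>
    intro buf pend hb hp
    simp [fcollect, rstrip_all_ws pend hp]
  | cons c t ih =>
    intro buf pend hb hp
    by_cases hsp : PySem.Chars.isspace c = true
    · simp only [fcollect, hsp, if_true, hb, ne_eq, not_false_iff]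
      rw [ih buf (pend ++ [c]) hb (by simp_all)]
      simp
    · simp only [fcollect, hsp, Bool.false_eq_true, if_false]
      rw [ih (buf ++ pend ++ [c]) [] (by simp) (by simp)]
      rw [rstrip_append_cons pend t c (by simpa using hsp)]
      simp

theorem fcollect_nil (l : List Char) : (fcollect [] [] l).1 = PySem.Chars.strip l := by
  induction l with
  | nil => rfl
  | cons c t ih =>
    by_cases hsp : PySem.Chars.isspace c = true
    · simpa [fcollect, hsp, PySem.Chars.strip, PySem.Chars.lstrip] using ih
    · simp only [fcollect, hsp, Bool.false_eq_true, if_false, List.nil_append]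
      rw [fcollect_ne t [c] [] (by simp) (by simp)]
      simp only [PySem.Chars.strip, PySem.Chars.lstrip, List.dropWhile_cons, hsp,
        Bool.false_eq_true, if_false]
      rw [show (c :: t) = [] ++ c :: t from rfl, rstrip_append_cons [] t c (by simpa using hsp)]
      simp

theorem dead_fold (l : List Char) (h : '\n' ∉ l) (hs : List String) (buf pend : List Char) :
    l.foldl pvStep (hs, 4, buf, pend) = (hs, 4, buf, pend) := by
  induction l with
  | nil => rfl
  | cons c t ih =>
    have hc : c ≠ '\n' := fun hh => h (by simp [hh])
    have ht : '\n' ∉ t := fun hm => h (List.mem_cons_of_mem _ hm)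
    simp only [List.foldl_cons, pvStep, hc, if_false]
    exact ih ht

theorem skip0_fold (l : List Char) (h : '\n' ∉ l) (hs : List String) :
    l.foldl pvStep (hs, 0, [], []) = (l.dropWhile PySem.Chars.isspace).foldl pvStep (hs, 0, [], []) := by
  induction l with
  | nil => rfl
  | cons c t ih =>
    have hc : c ≠ '\n' := fun hh => h (by simp [hh])
    have ht : '\n' ∉ t := fun hm => h (List.mem_cons_of_mem _ hm)
    by_cases hsp : PySem.Chars.isspace c = true
    · have hch : c ≠ '#' := fun hh => by rw [hh] at hsp; simp [PySem.Chars.isspace] at hsp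
      simp only [List.dropWhile_cons, hsp, if_true, List.foldl_cons, pvStep, hc, if_false, hch]
      simpa using ih ht
    · simp [hsp]

theorem cond_false_of_not_prefix (hs : List String) (l : List Char)
    (h : ¬ (['#', '#', ' '] <+: l.dropWhile PySem.Chars.isspace)) : aLineChars hs l = hs := by
  have hsw : PySem.Chars.startswith (PySem.Chars.strip l) ['#', '#', ' '] = false := by
    by_contra hb
    have hb' : PySem.Chars.startswith (PySem.Chars.strip l) ['#', '#', ' '] = true := by
      simpa using hb
    have hp := (PySem.Chars.startswith_iff _ _).mp hb'
    exact h (hp.trans (rstrip_prefix (l.dropWhile PySem.Chars.isspace)))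
  simp [aLineChars, hsw]

theorem lineStep (l : List Char) (h : '\n' ∉ l) (hs : List String) :
    (l ++ ['\n']).foldl pvStep (hs, 0, [], []) = (aLineChars hs l, 0, [], []) := by
  have hfin : ∀ (st : Nat), st ≠ 3 → ∀ b p : List Char,
      pvStep (hs, st, b, p) '\n' = (hs, 0, [], []) := by
    intro st hst b p
    simp [pvStep, hst]
  have hstepA : pvStep (hs, 0, [], []) '#' = (hs, 1, [], []) := by simp [pvStep]
  have hstepB : pvStep (hs, 1, [], []) '#' = (hs, 2, [], []) := by simp [pvStep]
  have hstepC : pvStep (hs, 2, [], []) ' ' = (hs, 3, [], []) := by simp [pvStep]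
  rw [List.foldl_append, skip0_fold l h hs]
  simp only [List.foldl_cons, List.foldl_nil]
  have hd' : '\n' ∉ l.dropWhile PySem.Chars.isspace := fun hm =>
    h ((List.dropWhile_sublist _).subset hm)
  have hstrip : PySem.Chars.strip l
      = PySem.Chars.rstrip (l.dropWhile PySem.Chars.isspace) := rfl
  cases hd : l.dropWhile PySem.Chars.isspace with
  | nil =>
    rw [cond_false_of_not_prefix hs l (by rw [hd]; simp)]
    rw [List.foldl_nil, hfin 0 (by decide) [] []]
  | cons c1 t1 =>
    have hc1 : PySem.Chars.isspace c1 = false := by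
      have := List.head_dropWhile_not PySem.Chars.isspace (l := l) (by simp [hd])
      simpa [hd] using this
    rw [hd] at hd'
    have hc1n : c1 ≠ '\n' := fun hh => hd' (by simp [hh])
    have ht1 : '\n' ∉ t1 := fun hm => hd' (List.mem_cons_of_mem _ hm)
    by_cases h1 : c1 = '#'
    · subst h1
      rw [List.foldl_cons, hstepA]
      cases t1 with
      | nil =>
        rw [cond_false_of_not_prefix hs l (by rw [hd]; decide)]
        rw [List.foldl_nil, hfin 1 (by decide) [] []]
      | cons c2 t2 =>
        have hc2n : c2 ≠ '\n' := fun hh => ht1 (by simp [hh])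
        have ht2 : '\n' ∉ t2 := fun hm => ht1 (List.mem_cons_of_mem _ hm)
        by_cases h2 : c2 = '#'
        · subst h2
          rw [List.foldl_cons, hstepB]
          cases t2 with
          | nil =>
            rw [cond_false_of_not_prefix hs l (by rw [hd]; decide)]
            rw [List.foldl_nil, hfin 2 (by decide) [] []]
          | cons c3 t3 =>
            have hc3n : c3 ≠ '\n' := fun hh => ht2 (by simp [hh])
            have ht3 : '\n' ∉ t3 := fun hm => ht2 (List.mem_cons_of_mem _ hm)
            by_cases h3 : c3 = ' '
            · subst h3
              rw [List.foldl_cons, hstepC, collect_fold t3 ht3 hs [] []]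
              by_cases hb : PySem.Chars.strip t3 = []
              · have hall : t3.all PySem.Chars.isspace = true := strip_nil_all t3 hb
                have hws : ((' ' :: t3).all PySem.Chars.isspace) = true := by
                  simp only [List.all_cons, hall]; decide
                have hst : PySem.Chars.strip l = ['#', '#'] := by
                  rw [hstrip, hd,
                    show ('#' :: '#' :: ' ' :: t3) = ['#', '#'] ++ (' ' :: t3) from rfl,
                    rstrip_append_all_ws _ _ hws]
                  decide
                have hbuf : (fcollect [] [] t3).1 = [] := by rw [fcollect_nil, hb]
                have hstep3 : pvStep (hs, 3, fcollect [] [] t3) '\n' = (hs, 0, [], []) := by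
                  rcases hfc : fcollect [] [] t3 with ⟨b, p⟩
                  rw [hfc] at hbuf
                  simp only at hbuf
                  subst hbuf
                  simp [pvStep]
                rw [hstep3]
                rw [show aLineChars hs l = hs from by
                  simp [aLineChars, hst, PySem.Chars.startswith, List.isPrefixOf]]
              · have hbuf : (fcollect [] [] t3).1 = PySem.Chars.strip t3 := fcollect_nil t3
                have hstep3 : pvStep (hs, 3, fcollect [] [] t3) '\n'
                    = (hs ++ [String.ofList (PySem.Chars.strip t3)], 0, [], []) := by
                  rcases hfc : fcollect [] [] t3 with ⟨b, p⟩
                  rw [hfc] at hbuf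
                  simp only at hbuf
                  subst hbuf
                  simp [pvStep, hb]
                rw [hstep3]
                -- compute A's side
                obtain ⟨c, w, hcw⟩ : ∃ c w, t3.dropWhile PySem.Chars.isspace = c :: w := by
                  cases hq : t3.dropWhile PySem.Chars.isspace with
                  | nil =>
                    exfalso
                    apply hb
                    rw [PySem.Chars.strip, PySem.Chars.lstrip, hq]
                    rfl
                  | cons c w => exact ⟨c, w, rfl⟩
                have hcn : PySem.Chars.isspace c = false := by
                  have := List.head_dropWhile_not PySem.Chars.isspace (l := t3) (by simp [hcw])
                  simpa [hcw] using this
                have ht3eq : t3 = t3.takeWhile PySem.Chars.isspace ++ c :: w := by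
                  have := List.takeWhile_append_dropWhile
                    (p := PySem.Chars.isspace) (l := t3)
                  rw [hcw] at this
                  exact this.symm
                have hstl : PySem.Chars.strip l
                    = '#' :: '#' :: ' ' :: (t3.takeWhile PySem.Chars.isspace ++ c :: PySem.Chars.rstrip w) := by
                  rw [hstrip, hd]
                  conv_lhs => rw [ht3eq]
                  rw [show ('#' :: '#' :: ' ' :: (t3.takeWhile PySem.Chars.isspace ++ c :: w))
                      = (['#', '#', ' '] ++ t3.takeWhile PySem.Chars.isspace) ++ c :: w from by
                        simp,
                    rstrip_append_cons _ _ _ hcn]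
                  simp
                have hstt3 : PySem.Chars.strip t3 = c :: PySem.Chars.rstrip w := by
                  rw [PySem.Chars.strip, PySem.Chars.lstrip, hcw,
                    show (c :: w) = [] ++ c :: w from rfl, rstrip_append_cons [] w c hcn]
                  rfl
                have hdrop3 : PySem.Chars.strip ((PySem.Chars.strip l).drop 3)
                    = c :: PySem.Chars.rstrip w := by
                  rw [hstl]
                  simp only [List.drop_succ_cons, List.drop_zero]
                  rw [PySem.Chars.strip, PySem.Chars.lstrip, List.dropWhile_append]
                  rw [show (t3.takeWhile PySem.Chars.isspace).dropWhile PySem.Chars.isspace = []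
                    from List.dropWhile_eq_nil_iff.mpr (fun x hx => List.mem_takeWhile_imp hx)]
                  simp only [List.isEmpty_nil, if_true, List.dropWhile_cons, hcn,
                    Bool.false_eq_true, if_false]
                  rw [show (c :: PySem.Chars.rstrip w) = [] ++ c :: PySem.Chars.rstrip w from rfl,
                    rstrip_append_cons [] _ c hcn, rstrip_idem]
                have hsw1 : PySem.Chars.startswith (PySem.Chars.strip l) ['#', '#', ' '] = true := by
                  rw [PySem.Chars.startswith_iff, hstl]
                  exact ⟨_, rfl⟩
                have hsw2 : PySem.Chars.startswith (PySem.Chars.strip l) ['#', '#', '#', ' '] = false := by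
                  by_contra hx
                  have hx' : PySem.Chars.startswith (PySem.Chars.strip l) ['#', '#', '#', ' '] = true := by
                    simpa using hx
                  obtain ⟨u, hu⟩ := (PySem.Chars.startswith_iff _ _).mp hx'
                  rw [hstl] at hu
                  simp at hu
                rw [show aLineChars hs l = hs ++ [String.ofList (c :: PySem.Chars.rstrip w)] from by
                  simp only [aLineChars, hsw1, hsw2, Bool.not_false, Bool.and_self, if_true,
                    hdrop3, ne_eq, reduceCtorEq, not_false_iff], hstt3]
            · have hstep : pvStep (hs, 2, [], []) c3 = (hs, 4, [], []) := by
                simp [pvStep, hc3n, h3]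
              rw [List.foldl_cons, hstep, dead_fold t3 ht3 hs [] []]
              rw [cond_false_of_not_prefix hs l (by
                rw [hd]
                rintro ⟨u, hu⟩
                simp at hu
                exact h3 hu.1.symm)]
              rw [hfin 4 (by decide) [] []]
        · have hstep : pvStep (hs, 1, [], []) c2 = (hs, 4, [], []) := by
            simp [pvStep, hc2n, h2]
          rw [List.foldl_cons, hstep, dead_fold t2 ht2 hs [] []]
          rw [cond_false_of_not_prefix hs l (by
            rw [hd]
            rintro ⟨u, hu⟩
            simp at hu
            exact h2 hu.1.symm)]
          rw [hfin 4 (by decide) [] []]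
    · have hstep : pvStep (hs, 0, [], []) c1 = (hs, 4, [], []) := by
        simp [pvStep, hc1n, h1, hc1]
      rw [List.foldl_cons, hstep, dead_fold t1 ht1 hs [] []]
      rw [cond_false_of_not_prefix hs l (by
        rw [hd]
        rintro ⟨u, hu⟩
        simp at hu
        exact h1 hu.1.symm)]
      rw [hfin 4 (by decide) [] []]

theorem mainFold (cs : List Char) (hs : List String) :
    (cs ++ ['\n']).foldl pvStep (hs, 0, [], []) = ((pvLines cs).foldl aLineChars hs, 0, [], []) := by
  induction hn : cs.length using Nat.strong_induction_on generalizing cs hs with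
  | _ n ih =>
  by_cases hmem : '\n' ∈ cs
  · -- split off the first line
    have hne : cs.dropWhile (fun c => decide (c ≠ '\n')) ≠ [] := by
      intro hq
      have := List.dropWhile_eq_nil_iff.mp hq _ hmem
      simp at this
    obtain ⟨x, t, hxt⟩ : ∃ x t, cs.dropWhile (fun c => decide (c ≠ '\n')) = x :: t := by
      cases hq : cs.dropWhile (fun c => decide (c ≠ '\n')) with
      | nil => exact absurd hq hne
      | cons x t => exact ⟨x, t, rfl⟩
    have hx : x = '\n' := by
      have h1 := List.head_dropWhile_not (fun c => decide (c ≠ '\n')) (l := cs)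
        (by rw [hxt]; exact List.cons_ne_nil x t)
      simp only [hxt, List.head_cons, decide_eq_false_iff_not, not_not] at h1
      exact h1
    subst hx
    have hcs : cs = cs.takeWhile (fun c => decide (c ≠ '\n')) ++ '\n' :: t := by
      have := List.takeWhile_append_dropWhile (p := fun c => decide (c ≠ '\n')) (l := cs)
      rw [hxt] at this
      exact this.symm
    have hnl : '\n' ∉ cs.takeWhile (fun c => decide (c ≠ '\n')) := by
      intro hm
      have := List.mem_takeWhile_imp hm
      simp at this
    have hlen : t.length < n := by
      rw [← hn, hcs]
      simp
      omega
    calc (cs ++ ['\n']).foldl pvStep (hs, 0, [], [])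
        = ((cs.takeWhile (fun c => decide (c ≠ '\n')) ++ ['\n']) ++ (t ++ ['\n'])).foldl
            pvStep (hs, 0, [], []) := by
          rw [← List.append_assoc]
          conv_lhs => rw [hcs]
          simp
      _ = (t ++ ['\n']).foldl pvStep
            (aLineChars hs (cs.takeWhile (fun c => decide (c ≠ '\n'))), 0, [], []) := by
          rw [List.foldl_append, lineStep _ hnl hs]
      _ = ((pvLines cs).foldl aLineChars hs, 0, [], []) := by
          rw [ih t.length hlen t _ rfl]
          conv_rhs => rw [hcs]
          rw [pvLines_append _ _ hnl]
          simp
  · rw [pvLines_of_no_nl cs hmem]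
    simp only [List.foldl_cons, List.foldl_nil]
    exact lineStep cs hmem hs

-- ===== VERDICT (by name: the statement is the Claim_ definition above) =====
theorem extract_h2_headers_py_spec : Claim_equal_extract_h2_headers_py := by
  intro text _
  show extract_h2_headers_py text = extract_h2_headers_py_alt text
  rw [A_eq, extract_h2_headers_py_alt, mainFold]
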